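-- pv_equiv track=rewrite | github.com/thechaoticsportsguy/RxBuddy | backend/domain/verdicts.py | evaluate_pairwise_interactions
-- ===== SOURCE A (Python) =====
-- NSAID_DRUGS = {"ibuprofen", "naproxen", "aspirin"}
--
-- ANTICOAGULANT_DRUGS = {"warfarin", "heparin"}
--
-- RENAL_RISK_DRUGS = {"metformin", "lisinopril", "losartan"}
--
-- EXPLICIT_PAIR_RISKS: dict[tuple[str, str], str] = {
--     ("ibuprofen", "warfarin"): "AVOID",
--     ("naproxen", "warfarin"): "AVOID",
--     ("aspirin", "warfarin"): "AVOID",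
--     ("heparin", "ibuprofen"): "AVOID",
--     ("heparin", "naproxen"): "AVOID",
--     ("heparin", "aspirin"): "AVOID",
--     ("ibuprofen", "metformin"): "CAUTION",
--     ("ibuprofen", "lisinopril"): "CAUTION",
--     ("ibuprofen", "losartan"): "CAUTION",
--     ("naproxen", "metformin"): "CAUTION",
--     ("naproxen", "lisinopril"): "CAUTION",
--     ("naproxen", "losartan"): "CAUTION",
--     ("aspirin", "metformin"): "CAUTION",
--     ("aspirin", "lisinopril"): "CAUTION",
--     ("aspirin", "losartan"): "CAUTION",
-- }
--
-- def _normalize_pair(drug_a: str, drug_b: str) -> tuple[str, str]: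
--     return tuple(sorted((drug_a.strip().lower(), drug_b.strip().lower())))
--
-- def evaluate_pair_interaction(drug_a: str, drug_b: str) -> str:
--     """Deterministic backend classification for a drug pair."""
--     left, right = _normalize_pair(drug_a, drug_b)
--     if left == right:
--         return "SAFE"
--     explicit = EXPLICIT_PAIR_RISKS.get((left, right))
--     if explicit:
--         return explicit
--     pair_set = {left, right}
--     if pair_set & NSAID_DRUGS and pair_set & ANTICOAGULANT_DRUGS:
--         return "AVOID"
--     if pair_set & NSAID_DRUGS and pair_set & RENAL_RISK_DRUGS:
--         return "CAUTION"
--     return "SAFE"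
--
-- def evaluate_pairwise_interactions(drugs: list[str]) -> tuple[str, dict[str, list[str]]]:
--     """Evaluate all unique drug pairs. Returns (aggregate_verdict, summary)."""
--     unique_drugs = list(dict.fromkeys(d.strip().lower() for d in drugs if d and d.strip()))
--     summary: dict[str, list[str]] = {"avoid_pairs": [], "caution_pairs": []}
--
--     if len(unique_drugs) < 2:
--         return "CONSULT_PHARMACIST", summary
--
--     saw_caution = False
--     for i, left in enumerate(unique_drugs):
--         for right in unique_drugs[i + 1 :]:
--             pair_verdict = evaluate_pair_interaction(left, right)
--             label = f"{_normalize_pair(left, right)[0]} + {_normalize_pair(left, right)[1]}"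
--             if pair_verdict == "AVOID":
--                 summary["avoid_pairs"].append(label)
--             elif pair_verdict == "CAUTION":
--                 summary["caution_pairs"].append(label)
--                 saw_caution = True
--
--     if summary["avoid_pairs"]:
--         return "AVOID", summary
--     if saw_caution:
--         return "CAUTION", summary
--     return "SAFE", summary
-- ===== SOURCE B (Python) =====
-- # Different algorithm: no all-pairs scan. One pass records the first-occurrence
-- # rank of each drug from the constant 15-entry risk table; candidate risky pairs
-- # are generated from that table, ranked by their flattened upper-triangular
-- # position, and sorted to reproduce the pair-iteration order.
--
-- # (lo, hi, verdict) with lo < hi lexicographically; label is f"{lo} + {hi}"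
-- RISKY_TABLE = [
--     ("ibuprofen", "warfarin", "AVOID"),
--     ("naproxen", "warfarin", "AVOID"),
--     ("aspirin", "warfarin", "AVOID"),
--     ("heparin", "ibuprofen", "AVOID"),
--     ("heparin", "naproxen", "AVOID"),
--     ("aspirin", "heparin", "AVOID"),
--     ("ibuprofen", "metformin", "CAUTION"),
--     ("ibuprofen", "lisinopril", "CAUTION"),
--     ("ibuprofen", "losartan", "CAUTION"),
--     ("metformin", "naproxen", "CAUTION"),
--     ("lisinopril", "naproxen", "CAUTION"),
--     ("losartan", "naproxen", "CAUTION"),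
--     ("aspirin", "metformin", "CAUTION"),
--     ("aspirin", "lisinopril", "CAUTION"),
--     ("aspirin", "losartan", "CAUTION"),
-- ]
--
-- KNOWN_DRUGS = frozenset(d for row in RISKY_TABLE for d in row[:2])
--
--
-- def evaluate_pairwise_interactions(drugs: list[str]) -> tuple[str, dict[str, list[str]]]:
--     seen = set()
--     pos = {}  # known drug -> rank among known drugs, in first-occurrence order
--     for d in drugs:
--         if d and d.strip():
--             x = d.strip().lower()
--             if x not in seen:
--                 seen.add(x)
--                 if x in KNOWN_DRUGS:
--                     pos[x] = len(pos)
--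
--     if len(seen) < 2:
--         return "CONSULT_PHARMACIST", {"avoid_pairs": [], "caution_pairs": []}
--
--     m = len(pos)
--     present = []
--     for lo, hi, verdict in RISKY_TABLE:
--         if lo in pos and hi in pos:
--             i, j = pos[lo], pos[hi]
--             if j < i:
--                 i, j = j, i
--             present.append((i * m + j, f"{lo} + {hi}", verdict))
--     present.sort(key=lambda t: t[0])
--
--     avoid = [label for _, label, v in present if v == "AVOID"]
--     caution = [label for _, label, v in present if v != "AVOID"]
--     verdict = "AVOID" if avoid else ("CAUTION" if caution else "SAFE")
--     return verdict, {"avoid_pairs": avoid, "caution_pairs": caution}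
-- ===== Notes on version B (the rewrite author's own statement) =====
-- stated objective: faster
-- what changed: B never enumerates pairs of the input: one pass records each known drug's first-occurrence rank in a dict, then the constant 15-entry risk table is filtered against that dict, each hit ranked by its flattened upper-triangular index and sorted, which reproduces A's pair-iteration order without the O(n^2) all-pairs classification loop.
import Mathlib
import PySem

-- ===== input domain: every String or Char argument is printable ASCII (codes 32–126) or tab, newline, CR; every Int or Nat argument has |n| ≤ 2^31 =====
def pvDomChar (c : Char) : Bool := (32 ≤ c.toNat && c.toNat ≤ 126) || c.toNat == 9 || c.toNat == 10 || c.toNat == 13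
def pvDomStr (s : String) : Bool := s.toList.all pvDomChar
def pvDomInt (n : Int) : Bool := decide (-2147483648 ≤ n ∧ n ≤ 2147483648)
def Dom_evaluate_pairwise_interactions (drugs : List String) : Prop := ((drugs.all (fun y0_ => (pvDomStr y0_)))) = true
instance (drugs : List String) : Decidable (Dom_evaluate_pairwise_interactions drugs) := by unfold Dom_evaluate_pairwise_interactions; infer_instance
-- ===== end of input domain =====

-- B removes A's O(n^2) all-pairs classification: one pass records each known drug's
-- first-occurrence rank, the constant 15-entry risk table is filtered against it, and the
-- hits are sorted by their flattened upper-triangular rank (objective: faster).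

-- ===== PORT A =====
def NSAID_DRUGS : PySem.Set String := PySem.Set.ofList ["ibuprofen", "naproxen", "aspirin"]
def ANTICOAGULANT_DRUGS : PySem.Set String := PySem.Set.ofList ["warfarin", "heparin"]
def RENAL_RISK_DRUGS : PySem.Set String := PySem.Set.ofList ["metformin", "lisinopril", "losartan"]
def EXPLICIT_PAIR_RISKS : PySem.Dict (String × String) String := PySem.Dict.ofList
  [ (("ibuprofen", "warfarin"), "AVOID"), (("naproxen", "warfarin"), "AVOID"),
    (("aspirin", "warfarin"), "AVOID"), (("heparin", "ibuprofen"), "AVOID"),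
    (("heparin", "naproxen"), "AVOID"), (("heparin", "aspirin"), "AVOID"),
    (("ibuprofen", "metformin"), "CAUTION"), (("ibuprofen", "lisinopril"), "CAUTION"),
    (("ibuprofen", "losartan"), "CAUTION"), (("naproxen", "metformin"), "CAUTION"),
    (("naproxen", "lisinopril"), "CAUTION"), (("naproxen", "losartan"), "CAUTION"),
    (("aspirin", "metformin"), "CAUTION"), (("aspirin", "lisinopril"), "CAUTION"),
    (("aspirin", "losartan"), "CAUTION") ]

def _normalize_pair (drug_a drug_b : String) : String × String :=
  let x := PySem.Str.lower (PySem.Str.strip drug_a)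
  let y := PySem.Str.lower (PySem.Str.strip drug_b)
  -- tuple(sorted((x, y))): the two-element (stable) sort written out; Python's string
  -- comparison is code-point lexicographic, i.e. List Char < on toList (kernel-evaluable)
  if y.toList < x.toList then (y, x) else (x, y)

def evaluate_pair_interaction (drug_a drug_b : String) : String :=
  let lr := _normalize_pair drug_a drug_b
  if lr.1 == lr.2 then "SAFE"
  else
    -- 'explicit = EXPLICIT_PAIR_RISKS.get(...); if explicit:' — None and "" are both falsy
    let explicit := (PySem.Dict.get? EXPLICIT_PAIR_RISKS (lr.1, lr.2)).getD ""
    if explicit != "" then explicit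
    else
      let pair_set : PySem.Set String := PySem.Set.ofList [lr.1, lr.2]
      if PySem.Set.inter pair_set NSAID_DRUGS != [] && PySem.Set.inter pair_set ANTICOAGULANT_DRUGS != [] then "AVOID"
      else if PySem.Set.inter pair_set NSAID_DRUGS != [] && PySem.Set.inter pair_set RENAL_RISK_DRUGS != [] then "CAUTION"
      else "SAFE"

-- the body of A's inner loop (named so the loop lemmas can speak about it)
def aInner (left : String) (st : PySem.Dict String (List String) × Bool) (right : String) :
    PySem.Dict String (List String) × Bool :=
  let pair_verdict := evaluate_pair_interaction left right
  let label := (_normalize_pair left right).1 ++ " + " ++ (_normalize_pair left right).2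
  if pair_verdict == "AVOID" then (st.1.modify "avoid_pairs" [] (fun l => l ++ [label]), st.2)
  else if pair_verdict == "CAUTION" then (st.1.modify "caution_pairs" [] (fun l => l ++ [label]), true)
  else st

def evaluate_pairwise_interactions (drugs : List String) : String × (List (String × List String)) :=
  let unique_drugs := PySem.List.dedup
    ((drugs.filter (fun d => d != "" && PySem.Str.strip d != "")).map
      (fun d => PySem.Str.lower (PySem.Str.strip d)))
  let summary : PySem.Dict String (List String) := PySem.Dict.ofList [("avoid_pairs", []), ("caution_pairs", [])]
  if unique_drugs.length < 2 then ("CONSULT_PHARMACIST", summary.items)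
  else
    let st := (PySem.List.enumerate unique_drugs).foldl
      (fun st p => (PySem.List.slice unique_drugs (some (p.1 + 1)) none).foldl (aInner p.2) st)
      (summary, false)
    if st.1.getD "avoid_pairs" [] != [] then ("AVOID", st.1.items)
    else if st.2 then ("CAUTION", st.1.items)
    else ("SAFE", st.1.items)

-- ===== PORT B =====
-- (lo, hi, verdict) with lo < hi lexicographically; label is lo ++ " + " ++ hi
def pvRISKY : List (String × String × String) :=
  [ ("ibuprofen", "warfarin", "AVOID"), ("naproxen", "warfarin", "AVOID"),
    ("aspirin", "warfarin", "AVOID"), ("heparin", "ibuprofen", "AVOID"),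
    ("heparin", "naproxen", "AVOID"), ("aspirin", "heparin", "AVOID"),
    ("ibuprofen", "metformin", "CAUTION"), ("ibuprofen", "lisinopril", "CAUTION"),
    ("ibuprofen", "losartan", "CAUTION"), ("metformin", "naproxen", "CAUTION"),
    ("lisinopril", "naproxen", "CAUTION"), ("losartan", "naproxen", "CAUTION"),
    ("aspirin", "metformin", "CAUTION"), ("aspirin", "lisinopril", "CAUTION"),
    ("aspirin", "losartan", "CAUTION") ]

-- KNOWN_DRUGS = frozenset(d for row in RISKY_TABLE for d in row[:2])
def pvKNOWN : PySem.Set String :=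
  PySem.Set.ofList (pvRISKY.flatMap (fun t => [t.1, t.2.1]))

-- body of B's single normalize/dedupe/position pass
def bScan (st : PySem.Set String × PySem.Dict String Int) (d : String) :
    PySem.Set String × PySem.Dict String Int :=
  if d != "" && PySem.Str.strip d != "" then
    let x := PySem.Str.lower (PySem.Str.strip d)
    if PySem.Set.contains st.1 x then st
    else (PySem.Set.add st.1 x,
          if PySem.Set.contains pvKNOWN x then st.2.insert x (st.2.size : Int) else st.2)
  else st

def evaluate_pairwise_interactions_alt (drugs : List String) : String × (List (String × List String)) :=
  let st := drugs.foldl bScan (PySem.Set.empty, PySem.Dict.empty)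
  if st.1.length < 2 then ("CONSULT_PHARMACIST", [("avoid_pairs", []), ("caution_pairs", [])])
  else
    let m : Int := st.2.size
    let present := pvRISKY.foldl (fun acc t =>
      if st.2.contains t.1 && st.2.contains t.2.1 then
        acc ++ [(let i := st.2.getD t.1 0
                 let j := st.2.getD t.2.1 0
                 let ij := if j < i then (j, i) else (i, j)
                 (ij.1 * m + ij.2, t.1 ++ " + " ++ t.2.1, t.2.2))]
      else acc) []
    let presentS := PySem.List.sorted present (fun t => t.1) false
    let avoid := (presentS.filter (fun t => t.2.2 == "AVOID")).map (fun t => t.2.1)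
    let caution := (presentS.filter (fun t => t.2.2 != "AVOID")).map (fun t => t.2.1)
    ((if avoid != [] then "AVOID" else if caution != [] then "CAUTION" else "SAFE"),
     [("avoid_pairs", avoid), ("caution_pairs", caution)])

-- ===== PRECONDITION & SPEC =====
def Spec_evaluate_pairwise_interactions (drugs : List String) (out : String × (List (String × List String))) : Prop := out = evaluate_pairwise_interactions_alt drugs
instance (drugs : List String) (out : String × (List (String × List String))) : Decidable (Spec_evaluate_pairwise_interactions drugs out) := by unfold Spec_evaluate_pairwise_interactions; infer_instance

-- ===== CLAIM (what is proved, stated in full; the proofs are below) =====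
def Claim_equal_evaluate_pairwise_interactions : Prop := ∀ (drugs : List String), Dom_evaluate_pairwise_interactions drugs → Spec_evaluate_pairwise_interactions drugs (evaluate_pairwise_interactions drugs)

-- ===== LEMMAS AND PROOFS =====

-- abbreviations for the proofs
def normS (d : String) : String := PySem.Str.lower (PySem.Str.strip d)
def mkD (av ca : List String) : PySem.Dict String (List String) := ⟨[("avoid_pairs", av), ("caution_pairs", ca)]⟩

def pvNSAIDS : List String := ["ibuprofen", "naproxen", "aspirin"]
def pvANTICOAGULANTS : List String := ["warfarin", "heparin"]
def pvRENAL : List String := ["metformin", "lisinopril", "losartan"]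
def pvKnownB (x : String) : Bool := pvNSAIDS.contains x || pvANTICOAGULANTS.contains x || pvRENAL.contains x
def pvK8 : List String := pvNSAIDS ++ pvANTICOAGULANTS ++ pvRENAL

-- Python string comparison = code-point lexicographic = List Char < on toList
def bLab (a b : String) : String := if a.toList < b.toList then a ++ " + " ++ b else b ++ " + " ++ a
def bCondAvoid (a b : String) : Bool :=
  (pvNSAIDS.contains a && pvANTICOAGULANTS.contains b) || (pvNSAIDS.contains b && pvANTICOAGULANTS.contains a)
def bCondCaution (a b : String) : Bool :=
  (pvNSAIDS.contains a && pvRENAL.contains b) || (pvNSAIDS.contains b && pvRENAL.contains a)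

-- reference step: what one A-pair contributes, as two list accumulators
def bInner (a : String) (ac : List String × List String) (b : String) : List String × List String :=
  if bCondAvoid a b then (ac.1 ++ [bLab a b], ac.2)
  else if bCondCaution a b then (ac.1, ac.2 ++ [bLab a b])
  else ac

-- the all-pairs nested loop, structurally
def pairFold {σ : Type} (f : String → σ → String → σ) : List String → σ → σ
  | [], st => st
  | x :: xs, st => pairFold f xs (xs.foldl (f x) st)

-- the ranked emission list of the nested pair loop: block k pairs rel[k] with rel[j], j>k
def pvItem (m i j : Int) (x y : String) : Option (Int × String × String) :=
  if bCondAvoid x y then some (i * m + j, bLab x y, "AVOID")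
  else if bCondCaution x y then some (i * m + j, bLab x y, "CAUTION") else none

def pvEmit (m : Int) : Int → List String → List (Int × String × String)
  | _, [] => []
  | k, x :: xs =>
      (PySem.List.enumerate xs (k + 1)).filterMap (fun p => pvItem m k p.1 x p.2)
        ++ pvEmit m (k + 1) xs

def pvA (e : List (Int × String × String)) : List String :=
  (e.filter (fun t => t.2.2 == "AVOID")).map (fun t => t.2.1)
def pvC (e : List (Int × String × String)) : List String :=
  (e.filter (fun t => t.2.2 != "AVOID")).map (fun t => t.2.1)

-- the position dict B builds: drug -> index in rel
def posD (l : List String) : PySem.Dict String Int :=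
  ⟨(PySem.List.enumerate l 0).map (fun p => (p.2, p.1))⟩

-- B's per-table-entry item, with positions read off rel
def pvG (rel : List String) (t : String × String × String) : Int × String × String :=
  ((min ((rel.idxOf t.1 : Nat) : Int) ((rel.idxOf t.2.1 : Nat) : Int)) * (rel.length : Int)
      + max ((rel.idxOf t.1 : Nat) : Int) ((rel.idxOf t.2.1 : Nat) : Int),
   t.1 ++ " + " ++ t.2.1, t.2.2)

theorem pv_toNat_ofNat_valid (n : Nat) (h : Nat.isValidChar n) : (Char.ofNat n).toNat = n := by
  simp [Char.ofNat, h, Char.toNat, Char.ofNatAux]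
theorem pv_isupper_eq (c : Char) : PySem.Chars.isupper c = (decide (65 ≤ c.toNat ∧ c.toNat ≤ 90)) := by
  rw [PySem.Chars.isupper]
  rcases c with ⟨⟨⟨n, hn⟩⟩, hv⟩
  simp [Char.le_def, UInt32.le_iff_toNat_le, Char.toNat]
theorem pv_lowerChar_toNat (c : Char) :
    (PySem.Chars.lowerChar c).toNat = if 65 ≤ c.toNat ∧ c.toNat ≤ 90 then c.toNat + 32 else c.toNat := by
  rw [PySem.Chars.lowerChar, pv_isupper_eq]
  by_cases h : 65 ≤ c.toNat ∧ c.toNat ≤ 90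
  · simp only [h]
    exact pv_toNat_ofNat_valid _ (by left; omega)
  · simp only [h, decide_false, if_false]
    rfl
theorem pv_lowerChar_idem (c : Char) :
    PySem.Chars.lowerChar (PySem.Chars.lowerChar c) = PySem.Chars.lowerChar c := by
  conv_lhs => rw [PySem.Chars.lowerChar]
  rw [pv_isupper_eq]
  have h := pv_lowerChar_toNat c
  rw [if_neg]
  intro hc
  simp only [decide_eq_true_eq] at hc
  rw [h] at hc
  split_ifs at hc <;> omega
theorem pv_isspace_lowerChar (c : Char) :
    PySem.Chars.isspace (PySem.Chars.lowerChar c) = PySem.Chars.isspace c := by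
  have h := pv_lowerChar_toNat c
  rw [PySem.Chars.isspace, PySem.Chars.isspace]
  simp only [h]
  split_ifs with hc
  · refine Bool.eq_iff_iff.mpr ?_
    simp only [Bool.or_eq_true, Bool.and_eq_true, decide_eq_true_eq]
    omega
  · rfl

theorem pv_dropWhile_idem {α : Type} (p : α → Bool) (l : List α) :
    List.dropWhile p (List.dropWhile p l) = List.dropWhile p l := by
  induction l with
  | nil => rfl
  | cons x t ih =>
    by_cases h : p x = true
    · simp [h, ih]
    · simp [h]

theorem pv_dropWhile_prefix {α : Type} (p : α → Bool) (l l' : List α)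
    (hl : List.dropWhile p l = l) (hp : l' <+: l) : List.dropWhile p l' = l' := by
  cases l' with
  | nil => rfl
  | cons x t =>
    obtain ⟨rest, hrest⟩ := hp
    have hx : p x = false := by
      by_contra hpx
      have hpx' : p x = true := by revert hpx; cases p x <;> simp
      rw [← hrest] at hl
      simp only [List.cons_append, List.dropWhile_cons, hpx', if_true] at hl
      have h1 := List.length_dropWhile_le p (t ++ rest)
      rw [hl] at h1
      simp at h1
    simp [hx]

theorem pv_lower_lower (cs : List Char) :
    PySem.Chars.lower (PySem.Chars.lower cs) = PySem.Chars.lower cs := by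
  simp [PySem.Chars.lower, Function.comp_def, pv_lowerChar_idem]

theorem pv_strip_lower (cs : List Char) :
    PySem.Chars.strip (PySem.Chars.lower cs) = PySem.Chars.lower (PySem.Chars.strip cs) := by
  have hsp : (PySem.Chars.isspace ∘ PySem.Chars.lowerChar) = PySem.Chars.isspace := by
    funext c; exact pv_isspace_lowerChar c
  rw [PySem.Chars.strip, PySem.Chars.lstrip, PySem.Chars.rstrip, PySem.Chars.lower]
  rw [PySem.Chars.strip, PySem.Chars.lstrip, PySem.Chars.rstrip, PySem.Chars.lower]
  rw [List.dropWhile_map, hsp, ← List.map_reverse, List.dropWhile_map, hsp, ← List.map_reverse]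

theorem pv_strip_strip (cs : List Char) :
    PySem.Chars.strip (PySem.Chars.strip cs) = PySem.Chars.strip cs := by
  have hls : ∀ l : List Char, List.dropWhile PySem.Chars.isspace (PySem.Chars.rstrip (List.dropWhile PySem.Chars.isspace l)) = PySem.Chars.rstrip (List.dropWhile PySem.Chars.isspace l) := by
    intro l
    apply pv_dropWhile_prefix PySem.Chars.isspace (List.dropWhile PySem.Chars.isspace l)
    · exact pv_dropWhile_idem _ l
    · have h := List.reverse_prefix.mpr (List.dropWhile_suffix (l := (List.dropWhile PySem.Chars.isspace l).reverse) PySem.Chars.isspace)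
      simpa [PySem.Chars.rstrip] using h
  rw [PySem.Chars.strip, PySem.Chars.strip, PySem.Chars.lstrip, PySem.Chars.lstrip, hls]
  rw [PySem.Chars.rstrip, PySem.Chars.rstrip, List.reverse_reverse, pv_dropWhile_idem]

theorem pv_norm_norm (d : String) : normS (normS d) = normS d := by
  apply String.toList_inj.mp
  simp only [normS, PySem.Str.toList_lower, PySem.Str.toList_strip]
  rw [pv_strip_lower, pv_lower_lower, pv_strip_strip]

-- ---------- generic loop-shape lemma for A's nested loop ----------

theorem pv_enumSliceFold {σ : Type} (f : String → σ → String → σ) (l : List String) :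
    ∀ (u : List String) (k : Nat), u.drop k = l → ∀ (st : σ),
    (PySem.List.enumerate l (k : Int)).foldl
      (fun st p => (PySem.List.slice u (some (p.1 + 1)) none).foldl (f p.2) st) st
    = pairFold f l st := by
  induction l with
  | nil => intro u k h st; simp [PySem.List.enumerate_nil, pairFold]
  | cons x xs ih =>
    intro u k h st
    rw [PySem.List.enumerate_cons, List.foldl_cons]
    have hk1 : u.drop (k + 1) = xs := by
      rw [← List.drop_drop, h]
      rfl
    have hcast : (k : Int) + 1 = ((k + 1 : Nat) : Int) := by push_cast; ring
    have hs : PySem.List.slice u (some ((k : Int) + 1)) none = xs := by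
      rw [hcast, PySem.List.slice_from_natCast, hk1]
    rw [hs, hcast, ih u (k + 1) hk1]
    rfl

-- ---------- classifying a single pair (A-side reduction) ----------

theorem pv_mem_K8 (x : String) (hx : pvKnownB x = true) : x ∈ pvK8 := by
  simp only [pvKnownB, Bool.or_eq_true, List.contains_iff_mem] at hx
  simp only [pvK8, List.mem_append]
  tauto

theorem pv_known_norm (x : String) (hx : pvKnownB x = true) : normS x = x := by
  have h := pv_mem_K8 x hx
  fin_cases h <;> decide

theorem pv_known_pairs : ∀ x ∈ pvK8, ∀ y ∈ pvK8,
    evaluate_pair_interaction x y = (if bCondAvoid x y then "AVOID" else if bCondCaution x y then "CAUTION" else "SAFE")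
    ∧ (_normalize_pair x y).1 ++ " + " ++ (_normalize_pair x y).2 = bLab x y := by
  decide

-- the explicit table only mentions drugs from the known sets
theorem pv_get_explicit_none (l r : String) (h : pvKnownB l = false ∨ pvKnownB r = false) :
    PySem.Dict.get? EXPLICIT_PAIR_RISKS (l, r) = none := by
  rw [PySem.Dict.get?_eq_none_iff_not_mem_keys]
  intro hmem
  have hkeys : EXPLICIT_PAIR_RISKS.keys =
      [("ibuprofen", "warfarin"), ("naproxen", "warfarin"), ("aspirin", "warfarin"),
       ("heparin", "ibuprofen"), ("heparin", "naproxen"), ("heparin", "aspirin"),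
       ("ibuprofen", "metformin"), ("ibuprofen", "lisinopril"), ("ibuprofen", "losartan"),
       ("naproxen", "metformin"), ("naproxen", "lisinopril"), ("naproxen", "losartan"),
       ("aspirin", "metformin"), ("aspirin", "lisinopril"), ("aspirin", "losartan")] := by decide
  rw [hkeys] at hmem
  fin_cases hmem <;> revert h <;> decide

theorem pv_pair_set_two (l r : String) (hlr : (l == r) = false) :
    PySem.Set.ofList [l, r] = [l, r] := by
  apply PySem.Set.ofList_eq_self_of_nodup
  simp only [List.nodup_cons, List.mem_singleton, List.nodup_nil, and_true, List.not_mem_nil,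
    not_false_eq_true]
  intro he
  rw [he] at hlr
  simp at hlr

theorem pv_disjointNA (r : String) (h : NSAID_DRUGS.contains r = true) : ANTICOAGULANT_DRUGS.contains r = false := by
  have : r ∈ (["ibuprofen", "naproxen", "aspirin"] : List String) := by
    simpa [NSAID_DRUGS, PySem.Set.contains_iff] using h
  fin_cases this <;> decide

theorem pv_disjointNR (r : String) (h : NSAID_DRUGS.contains r = true) : RENAL_RISK_DRUGS.contains r = false := by
  have : r ∈ (["ibuprofen", "naproxen", "aspirin"] : List String) := by
    simpa [NSAID_DRUGS, PySem.Set.contains_iff] using h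
  fin_cases this <;> decide

theorem pv_unknown_not (x : String) (h : pvKnownB x = false) :
    NSAID_DRUGS.contains x = false ∧ ANTICOAGULANT_DRUGS.contains x = false ∧ RENAL_RISK_DRUGS.contains x = false := by
  simp only [pvKnownB, Bool.or_eq_false_iff] at h
  refine ⟨?_, ?_, ?_⟩ <;> simp_all [NSAID_DRUGS, ANTICOAGULANT_DRUGS, RENAL_RISK_DRUGS,
    pvNSAIDS, pvANTICOAGULANTS, pvRENAL, PySem.Set.ofList]

theorem pv_core_safe (l r : String) (h : pvKnownB l = false ∨ pvKnownB r = false) :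
    (if (l == r) = true then "SAFE"
     else if (((PySem.Dict.get? EXPLICIT_PAIR_RISKS (l, r)).getD "") != "") = true then ((PySem.Dict.get? EXPLICIT_PAIR_RISKS (l, r)).getD "")
     else if (PySem.Set.inter (PySem.Set.ofList [l, r]) NSAID_DRUGS != [] && PySem.Set.inter (PySem.Set.ofList [l, r]) ANTICOAGULANT_DRUGS != []) = true then "AVOID"
     else if (PySem.Set.inter (PySem.Set.ofList [l, r]) NSAID_DRUGS != [] && PySem.Set.inter (PySem.Set.ofList [l, r]) RENAL_RISK_DRUGS != []) = true then "CAUTION"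
     else "SAFE") = "SAFE" := by
  by_cases hlr : (l == r) = true
  · simp [hlr]
  · have hlr' : (l == r) = false := by simpa using hlr
    rw [if_neg (by simp [hlr'])]
    rw [pv_get_explicit_none l r h]
    rw [if_neg (by simp)]
    rw [pv_pair_set_two l r hlr']
    have hint : ∀ S : PySem.Set String, (PySem.Set.inter [l, r] S != []) = (S.contains l || S.contains r) := by
      intro S
      simp only [PySem.Set.inter, List.filter_cons, List.filter_nil]
      cases hcl : S.contains l <;> cases hcr : S.contains r <;> simp
    rw [if_neg, if_neg]
    · intro hcond
      rw [hint, hint] at hcond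
      rcases h with hu | hu <;> obtain ⟨h1, h2, h3⟩ := pv_unknown_not _ hu
      · rw [h1, h3] at hcond
        simp only [Bool.false_or, Bool.and_eq_true] at hcond
        rw [pv_disjointNR r hcond.1] at hcond
        simp at hcond
      · rw [h1, h3] at hcond
        simp only [Bool.or_false, Bool.and_eq_true] at hcond
        rw [pv_disjointNR l hcond.1] at hcond
        simp at hcond
    · intro hcond
      rw [hint, hint] at hcond
      rcases h with hu | hu <;> obtain ⟨h1, h2, h3⟩ := pv_unknown_not _ hu
      · rw [h1, h2] at hcond
        simp only [Bool.false_or, Bool.and_eq_true] at hcond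
        rw [pv_disjointNA r hcond.1] at hcond
        simp at hcond
      · rw [h1, h2] at hcond
        simp only [Bool.or_false, Bool.and_eq_true] at hcond
        rw [pv_disjointNA l hcond.1] at hcond
        simp at hcond

theorem pv_pair_unknown (x y : String) (hx : normS x = x) (hy : normS y = y)
    (h : pvKnownB x = false ∨ pvKnownB y = false) :
    evaluate_pair_interaction x y = "SAFE" := by
  have hnp : _normalize_pair x y = if y.toList < x.toList then (y, x) else (x, y) := by
    rw [_normalize_pair]
    rw [show PySem.Str.lower (PySem.Str.strip x) = x from hx,
        show PySem.Str.lower (PySem.Str.strip y) = y from hy]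
  rw [evaluate_pair_interaction, hnp]
  by_cases hyx : y.toList < x.toList
  · rw [if_pos hyx]
    exact pv_core_safe y x (Or.comm.mp h)
  · rw [if_neg hyx]
    exact pv_core_safe x y h

-- ---------- the literal two-key summary dict ----------

theorem pv_modify_avoid (av ca : List String) (lab : String) :
    (mkD av ca).modify "avoid_pairs" [] (fun l => l ++ [lab]) = mkD (av ++ [lab]) ca := by
  rfl

theorem pv_modify_caution (av ca : List String) (lab : String) :
    (mkD av ca).modify "caution_pairs" [] (fun l => l ++ [lab]) = mkD av (ca ++ [lab]) := by
  rfl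

theorem pv_getD_avoid (av ca : List String) : (mkD av ca).getD "avoid_pairs" [] = av := by
  rfl

-- ---------- inner loop correspondence (A to bInner) ----------

theorem pv_inner_step_known (x y : String) (hx : pvKnownB x = true) (hy : pvKnownB y = true)
    (av ca : List String) (f : Bool) :
    aInner x (mkD av ca, f) y =
      (if bCondAvoid x y then (mkD (av ++ [bLab x y]) ca, f)
       else if bCondCaution x y then (mkD av (ca ++ [bLab x y]), true)
       else (mkD av ca, f)) := by
  obtain ⟨hv, hl⟩ := pv_known_pairs x (pv_mem_K8 x hx) y (pv_mem_K8 y hy)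
  rw [aInner]
  simp only [hv, hl]
  by_cases ha : bCondAvoid x y = true
  · simp only [ha, if_true]
    rw [if_pos (by decide)]
    rw [pv_modify_avoid]
  · simp only [ha, Bool.false_eq_true, if_false]
    by_cases hc : bCondCaution x y = true
    · simp only [hc, if_true]
      rw [if_neg (by decide), if_pos (by decide)]
      rw [pv_modify_caution]
    · simp only [hc, Bool.false_eq_true, if_false]
      rw [if_neg (by decide), if_neg (by decide)]

theorem pv_inner_unknown (x : String) (hx : normS x = x) (hxk : pvKnownB x = false)
    (ys : List String) (hys : ∀ y ∈ ys, normS y = y) :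
    ∀ st, ys.foldl (aInner x) st = st := by
  induction ys with
  | nil => intro st; rfl
  | cons y t ih =>
    intro st
    rw [List.foldl_cons]
    have hstep : aInner x st y = st := by
      rw [aInner]
      rw [pv_pair_unknown x y hx (hys y (by simp)) (Or.inl hxk)]
      rw [if_neg (by decide), if_neg (by decide)]
    rw [hstep]
    exact ih (fun y hy => hys y (by simp [hy])) st

theorem pv_innerEq (x : String) (hx : pvKnownB x = true) (ys : List String)
    (hys : ∀ y ∈ ys, normS y = y) :
    ∀ av ca, ys.foldl (aInner x) (mkD av ca, !ca.isEmpty) =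
      ((mkD ((ys.filter pvKnownB).foldl (bInner x) (av, ca)).1
            ((ys.filter pvKnownB).foldl (bInner x) (av, ca)).2),
       !((ys.filter pvKnownB).foldl (bInner x) (av, ca)).2.isEmpty) := by
  induction ys with
  | nil => intro av ca; rfl
  | cons y t ih =>
    intro av ca
    have hyt : ∀ y ∈ t, normS y = y := fun y hy => hys y (by simp [hy])
    by_cases hk : pvKnownB y = true
    · rw [List.foldl_cons, List.filter_cons, if_pos hk, List.foldl_cons]
      rw [pv_inner_step_known x y hx hk]
      by_cases ha : bCondAvoid x y = true
      · simp only [ha, if_true]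
        rw [show bInner x (av, ca) y = (av ++ [bLab x y], ca) from by rw [bInner, if_pos ha]]
        exact ih hyt (av ++ [bLab x y]) ca
      · simp only [ha, Bool.false_eq_true, if_false]
        by_cases hc : bCondCaution x y = true
        · simp only [hc, if_true]
          rw [show bInner x (av, ca) y = (av, ca ++ [bLab x y]) from by
            rw [bInner, if_neg (by simp [ha]), if_pos hc]]
          have : (true : Bool) = !(ca ++ [bLab x y]).isEmpty := by simp
          rw [this]
          exact ih hyt av (ca ++ [bLab x y])
        · simp only [hc, Bool.false_eq_true, if_false]
          rw [show bInner x (av, ca) y = (av, ca) from by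
            rw [bInner, if_neg (by simp [ha]), if_neg (by simp [hc])]]
          exact ih hyt av ca
    · have hk' : pvKnownB y = false := by simpa using hk
      rw [List.foldl_cons, List.filter_cons, if_neg (by simp [hk'])]
      have hstep : aInner x (mkD av ca, !ca.isEmpty) y = (mkD av ca, !ca.isEmpty) := by
        rw [aInner]
        rw [pv_pair_unknown x y (pv_known_norm x hx) (hys y (by simp)) (Or.inr hk')]
        rw [if_neg (by decide), if_neg (by decide)]
      rw [hstep]
      exact ih hyt av ca

theorem pv_pairFoldEq (u : List String) (hu : ∀ z ∈ u, normS z = z) :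
    ∀ av ca, pairFold aInner u (mkD av ca, !ca.isEmpty) =
      ((mkD (pairFold bInner (u.filter pvKnownB) (av, ca)).1
            (pairFold bInner (u.filter pvKnownB) (av, ca)).2),
       !(pairFold bInner (u.filter pvKnownB) (av, ca)).2.isEmpty) := by
  induction u with
  | nil => intro av ca; rfl
  | cons x xs ih =>
    intro av ca
    have hxs : ∀ z ∈ xs, normS z = z := fun z hz => hu z (by simp [hz])
    by_cases hk : pvKnownB x = true
    · rw [show pairFold aInner (x :: xs) (mkD av ca, !ca.isEmpty)
          = pairFold aInner xs (xs.foldl (aInner x) (mkD av ca, !ca.isEmpty)) from rfl]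
      rw [pv_innerEq x hk xs hxs av ca]
      rw [List.filter_cons, if_pos hk]
      rw [show pairFold bInner (x :: xs.filter pvKnownB) (av, ca)
          = pairFold bInner (xs.filter pvKnownB) ((xs.filter pvKnownB).foldl (bInner x) (av, ca)) from rfl]
      exact ih hxs _ _
    · have hk' : pvKnownB x = false := by simpa using hk
      rw [show pairFold aInner (x :: xs) (mkD av ca, !ca.isEmpty)
          = pairFold aInner xs (xs.foldl (aInner x) (mkD av ca, !ca.isEmpty)) from rfl]
      rw [pv_inner_unknown x (hu x (by simp)) hk' xs hxs]
      rw [List.filter_cons, if_neg (by simp [hk'])]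
      exact ih hxs av ca

theorem pv_bne_nil (l : List String) : (l != []) = !l.isEmpty := by
  cases l <;> rfl

-- ---------- bInner = parts of the ranked emission list ----------

theorem pvA_cons_avoid (r : Int) (lab : String) (rest : List (Int × String × String)) :
    pvA ((r, lab, "AVOID") :: rest) = lab :: pvA rest := by simp [pvA]
theorem pvC_cons_avoid (r : Int) (lab : String) (rest : List (Int × String × String)) :
    pvC ((r, lab, "AVOID") :: rest) = pvC rest := by simp [pvC]
theorem pvA_cons_caution (r : Int) (lab : String) (rest : List (Int × String × String)) :
    pvA ((r, lab, "CAUTION") :: rest) = pvA rest := by simp [pvA]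
theorem pvC_cons_caution (r : Int) (lab : String) (rest : List (Int × String × String)) :
    pvC ((r, lab, "CAUTION") :: rest) = lab :: pvC rest := by simp [pvC]

theorem pv_row_parts (x : String) (m k : Int) : ∀ (ys : List String) (k' : Int),
    pvA ((PySem.List.enumerate ys k').filterMap (fun p => pvItem m k p.1 x p.2))
      = (ys.filter (fun y => bCondAvoid x y)).map (bLab x)
    ∧ pvC ((PySem.List.enumerate ys k').filterMap (fun p => pvItem m k p.1 x p.2))
      = (ys.filter (fun y => !bCondAvoid x y && bCondCaution x y)).map (bLab x) := by
  intro ys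
  induction ys with
  | nil => intro k'; simp [PySem.List.enumerate_nil, pvA, pvC]
  | cons y t ih =>
    intro k'
    rw [PySem.List.enumerate_cons, List.filterMap_cons]
    obtain ⟨h1, h2⟩ := ih (k' + 1)
    by_cases hA : bCondAvoid x y = true
    · rw [show pvItem m k k' x y = some (k * m + k', bLab x y, "AVOID") from by
        rw [pvItem, if_pos hA]]
      constructor
      · rw [pvA_cons_avoid, h1, List.filter_cons, if_pos hA, List.map_cons]
      · rw [pvC_cons_avoid, h2, List.filter_cons, if_neg (by simp [hA])]
    · have hA' : bCondAvoid x y = false := by simpa using hA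
      by_cases hC : bCondCaution x y = true
      · rw [show pvItem m k k' x y = some (k * m + k', bLab x y, "CAUTION") from by
          rw [pvItem, if_neg (by simp [hA']), if_pos hC]]
        constructor
        · rw [pvA_cons_caution, h1, List.filter_cons, if_neg (by simp [hA'])]
        · rw [pvC_cons_caution, h2, List.filter_cons, if_pos (by simp [hA', hC]), List.map_cons]
      · have hC' : bCondCaution x y = false := by simpa using hC
        rw [show pvItem m k k' x y = none from by
          rw [pvItem, if_neg (by simp [hA']), if_neg (by simp [hC'])]]
        constructor
        · rw [h1, List.filter_cons, if_neg (by simp [hA'])]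
        · rw [h2, List.filter_cons, if_neg (by simp [hA', hC'])]

theorem pv_inner_foldl (x : String) : ∀ (ys : List String) (av ca : List String),
    ys.foldl (bInner x) (av, ca)
      = (av ++ (ys.filter (fun y => bCondAvoid x y)).map (bLab x),
         ca ++ (ys.filter (fun y => !bCondAvoid x y && bCondCaution x y)).map (bLab x)) := by
  intro ys
  induction ys with
  | nil => intro av ca; simp
  | cons y t ih =>
    intro av ca
    rw [List.foldl_cons]
    by_cases hA : bCondAvoid x y = true
    · rw [show bInner x (av, ca) y = (av ++ [bLab x y], ca) from by rw [bInner, if_pos hA]]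
      rw [ih]
      simp [hA]
    · have hA' : bCondAvoid x y = false := by simpa using hA
      by_cases hC : bCondCaution x y = true
      · rw [show bInner x (av, ca) y = (av, ca ++ [bLab x y]) from by
          rw [bInner, if_neg (by simp [hA']), if_pos hC]]
        rw [ih]
        simp [hA', hC]
      · have hC' : bCondCaution x y = false := by simpa using hC
        rw [show bInner x (av, ca) y = (av, ca) from by
          rw [bInner, if_neg (by simp [hA']), if_neg (by simp [hC'])]]
        rw [ih]
        simp [hA', hC']

theorem pv_parts_append (e1 e2 : List (Int × String × String)) :
    pvA (e1 ++ e2) = pvA e1 ++ pvA e2 ∧ pvC (e1 ++ e2) = pvC e1 ++ pvC e2 := by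
  simp [pvA, pvC, List.filter_append]

theorem pv_emit_parts (m : Int) : ∀ (l : List String) (k : Int) (av ca : List String),
    pairFold bInner l (av, ca) = (av ++ pvA (pvEmit m k l), ca ++ pvC (pvEmit m k l)) := by
  intro l
  induction l with
  | nil => intro k av ca; simp [pairFold, pvEmit, pvA, pvC]
  | cons x xs ih =>
    intro k av ca
    rw [show pairFold bInner (x :: xs) (av, ca)
        = pairFold bInner xs (xs.foldl (bInner x) (av, ca)) from rfl]
    rw [pv_inner_foldl x xs av ca]
    rw [ih (k + 1)]
    rw [show pvEmit m k (x :: xs)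
        = (PySem.List.enumerate xs (k + 1)).filterMap (fun p => pvItem m k p.1 x p.2)
            ++ pvEmit m (k + 1) xs from rfl]
    obtain ⟨hpa, hpc⟩ := pv_parts_append
      ((PySem.List.enumerate xs (k + 1)).filterMap (fun p => pvItem m k p.1 x p.2))
      (pvEmit m (k + 1) xs)
    rw [hpa, hpc, (pv_row_parts x m k xs (k + 1)).1, (pv_row_parts x m k xs (k + 1)).2]
    simp [List.append_assoc]

-- ---------- rank bounds and ordering of the emission list ----------

theorem pv_item_fst (m i j : Int) (x y : String) (z : Int × String × String)
    (h : pvItem m i j x y = some z) : z.1 = i * m + j := by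
  rw [pvItem] at h
  split_ifs at h
  · cases h; rfl
  · cases h; rfl

theorem pv_mem_enumerate_iff {α : Type} (d : α) : ∀ (ys : List α) (s : Int) (p : Int × α),
    p ∈ PySem.List.enumerate ys s ↔ ∃ b : Nat, b < ys.length ∧ p = (s + b, ys.getD b d) := by
  intro ys
  induction ys with
  | nil => intro s p; simp [PySem.List.enumerate_nil]
  | cons y t ih =>
    intro s p
    rw [PySem.List.enumerate_cons, List.mem_cons, ih]
    constructor
    · rintro (h | ⟨b, hb, hp⟩)
      · exact ⟨0, by simp, by simpa using h⟩
      · refine ⟨b + 1, by simpa using Nat.succ_lt_succ hb, ?_⟩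
        rw [hp]
        simp only [List.getD_cons_succ, Prod.mk.injEq]
        exact ⟨by push_cast; ring, trivial⟩
    · rintro ⟨b, hb, hp⟩
      cases b with
      | zero => left; simpa using hp
      | succ b' =>
        right
        refine ⟨b', by simpa using Nat.lt_of_succ_lt_succ hb, ?_⟩
        rw [hp]
        simp only [List.getD_cons_succ, Prod.mk.injEq]
        exact ⟨by push_cast; ring, trivial⟩

theorem pv_row_mem (x : String) (m k k' : Int) (ys : List String)
    (t : Int × String × String)
    (ht : t ∈ (PySem.List.enumerate ys k').filterMap (fun p => pvItem m k p.1 x p.2)) :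
    ∃ b : Nat, b < ys.length ∧ t.1 = k * m + (k' + b) := by
  obtain ⟨p, hp, hi⟩ := List.mem_filterMap.mp ht
  obtain ⟨b, hb, rfl⟩ := (pv_mem_enumerate_iff "" ys k' p).mp hp
  exact ⟨b, hb, pv_item_fst _ _ _ _ _ _ hi⟩

theorem pv_emit_lb (m : Int) (hm : 0 ≤ m) : ∀ (l : List String) (k : Int), 0 ≤ k →
    ∀ t ∈ pvEmit m k l, k * m + k + 1 ≤ t.1 := by
  intro l
  induction l with
  | nil => intro k _ t ht; simp [pvEmit] at ht
  | cons x xs ih =>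
    intro k hk t ht
    rcases List.mem_append.mp ht with hrow | hrest
    · obtain ⟨b, hb, he⟩ := pv_row_mem x m k (k + 1) xs t hrow
      have hb0 : (0 : Int) ≤ (b : Int) := by positivity
      linarith [he.ge]
    · have h1 := ih (k + 1) (by omega) t hrest
      have e1 : k * m ≤ (k + 1) * m := mul_le_mul_of_nonneg_right (by omega) hm
      linarith

theorem pv_emit_pairwise (m : Int) : ∀ (l : List String) (k : Int), 0 ≤ k → k + l.length ≤ m →
    (pvEmit m k l).Pairwise (fun a b => a.1 < b.1) := by
  intro l
  induction l with
  | nil => intro k _ _; exact List.Pairwise.nil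
  | cons x xs ih =>
    intro k hk hlen
    have hlen' : k + ((xs.length : Int) + 1) ≤ m := by
      simpa [Nat.cast_add, Nat.cast_one, add_assoc] using hlen
    have hm : (0 : Int) ≤ m := by linarith [Int.natCast_nonneg xs.length]
    rw [show pvEmit m k (x :: xs)
        = (PySem.List.enumerate xs (k + 1)).filterMap (fun p => pvItem m k p.1 x p.2)
            ++ pvEmit m (k + 1) xs from rfl]
    rw [List.pairwise_append]
    refine ⟨?_, ih (k + 1) (by omega) (by push_cast; push_cast at hlen'; linarith), ?_⟩
    · -- within-row: ranks follow the enumerate indices, which strictly increase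
      have hen : (PySem.List.enumerate xs (k + 1)).Pairwise (fun p q => p.1 < q.1) := by
        have h := PySem.List.pairwise_lt_pyRange_one (k + 1) (k + 1 + xs.length)
        rw [← PySem.List.map_fst_enumerate xs (k + 1)] at h
        exact List.pairwise_map.mp h
      rw [List.pairwise_filterMap]
      refine hen.imp ?_
      intro p q hpq z hz w hw
      rw [pv_item_fst _ _ _ _ _ _ hz, pv_item_fst _ _ _ _ _ _ hw]
      linarith
    · intro a ha b hb
      obtain ⟨ba, hba, hea⟩ := pv_row_mem x m k (k + 1) xs a ha
      have h1 := pv_emit_lb m hm xs (k + 1) (by omega) b hb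
      have e1 : (k + 1) * m = k * m + m := by ring
      have hcast : ((ba : Int)) < (xs.length : Int) := by exact_mod_cast hba
      linarith [hea.le]

theorem pv_emit_mem (m : Int) : ∀ (l : List String) (k : Int) (z : Int × String × String),
    z ∈ pvEmit m k l ↔ ∃ a b : Nat, a < b ∧ b < l.length ∧
      pvItem m (k + a) (k + b) (l.getD a "") (l.getD b "") = some z := by
  intro l
  induction l with
  | nil => intro k z; simp [pvEmit]
  | cons x xs ih =>
    intro k z
    rw [show pvEmit m k (x :: xs)
        = (PySem.List.enumerate xs (k + 1)).filterMap (fun p => pvItem m k p.1 x p.2)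
            ++ pvEmit m (k + 1) xs from rfl]
    rw [List.mem_append, List.mem_filterMap, ih]
    constructor
    · rintro (⟨p, hp, hi⟩ | ⟨a, b, hab, hb, hi⟩)
      · obtain ⟨b, hb, rfl⟩ := (pv_mem_enumerate_iff "" xs (k + 1) p).mp hp
        refine ⟨0, b + 1, Nat.succ_pos b, by simpa using Nat.succ_lt_succ hb, ?_⟩
        simp only [List.getD_cons_zero, List.getD_cons_succ, Nat.cast_add, Nat.cast_one,
          Nat.cast_zero, add_zero]
        rw [show k + ((b : Int) + 1) = k + 1 + b from by ring]
        exact hi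
      · refine ⟨a + 1, b + 1, Nat.succ_lt_succ hab, by simpa using Nat.succ_lt_succ hb, ?_⟩
        simp only [List.getD_cons_succ, Nat.cast_add, Nat.cast_one]
        rw [show k + ((a : Int) + 1) = k + 1 + a from by ring,
            show k + ((b : Int) + 1) = k + 1 + b from by ring]
        exact hi
    · rintro ⟨a, b, hab, hb, hi⟩
      cases a with
      | zero =>
        cases b with
        | zero => omega
        | succ b' =>
          left
          refine ⟨(k + 1 + (b' : Int), xs.getD b' ""),
            (pv_mem_enumerate_iff "" xs (k + 1) _).mpr
              ⟨b', by simpa using Nat.lt_of_succ_lt_succ hb, rfl⟩, ?_⟩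
          simp only [List.getD_cons_zero, List.getD_cons_succ, Nat.cast_add, Nat.cast_one,
            Nat.cast_zero, add_zero] at hi
          rw [show k + ((b' : Int) + 1) = k + 1 + b' from by ring] at hi
          exact hi
      | succ a' =>
        cases b with
        | zero => omega
        | succ b' =>
          right
          refine ⟨a', b', Nat.lt_of_succ_lt_succ hab, by simpa using Nat.lt_of_succ_lt_succ hb, ?_⟩
          simp only [List.getD_cons_succ, Nat.cast_add, Nat.cast_one] at hi
          rw [show k + ((a' : Int) + 1) = k + 1 + a' from by ring,
              show k + ((b' : Int) + 1) = k + 1 + b' from by ring] at hi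
          exact hi

-- ---------- table facts (decidable) ----------

theorem pv_entry_facts : ∀ t ∈ pvRISKY, t.1 ∈ pvK8 ∧ t.2.1 ∈ pvK8 ∧ t.1 ≠ t.2.1 ∧
    bLab t.1 t.2.1 = t.1 ++ " + " ++ t.2.1 ∧
    (if t.2.2 = "AVOID" then bCondAvoid t.1 t.2.1 = true
     else bCondAvoid t.1 t.2.1 = false ∧ bCondCaution t.1 t.2.1 = true ∧ t.2.2 = "CAUTION") := by
  decide

theorem pv_pair_exists : ∀ x ∈ pvK8, ∀ y ∈ pvK8,
    ((bCondAvoid x y || bCondCaution x y) = true →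
      ∃ t ∈ pvRISKY, (t.1 = x ∧ t.2.1 = y) ∨ (t.1 = y ∧ t.2.1 = x)) := by
  decide

theorem pv_lab_symm : ∀ x ∈ pvK8, ∀ y ∈ pvK8, x ≠ y → bLab x y = bLab y x := by
  decide

theorem pv_entries_distinct : ∀ t ∈ pvRISKY, ∀ t' ∈ pvRISKY,
    ((t.1 = t'.1 ∧ t.2.1 = t'.2.1) ∨ (t.1 = t'.2.1 ∧ t.2.1 = t'.1)) → t = t' := by
  decide

theorem pv_condA_symm (x y : String) : bCondAvoid x y = bCondAvoid y x := by
  rw [bCondAvoid, bCondAvoid, Bool.or_comm]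

theorem pv_condC_symm (x y : String) : bCondCaution x y = bCondCaution y x := by
  rw [bCondCaution, bCondCaution, Bool.or_comm]

-- ---------- rank decoding ----------

theorem pv_rank_inj (m i₁ j₁ i₂ j₂ : Int) (h1 : 0 ≤ i₁) (h2 : i₁ < j₁) (h3 : j₁ < m)
    (h4 : 0 ≤ i₂) (h5 : i₂ < j₂) (h6 : j₂ < m) (he : i₁ * m + j₁ = i₂ * m + j₂) :
    i₁ = i₂ ∧ j₁ = j₂ := by
  rcases lt_trichotomy i₁ i₂ with h | h | h
  · exfalso
    have e1 : (i₁ + 1) * m ≤ i₂ * m :=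
      mul_le_mul_of_nonneg_right (by omega) (by omega)
    have e2 : (i₁ + 1) * m = i₁ * m + m := by ring
    linarith
  · exact ⟨h, by rw [h] at he; linarith⟩
  · exfalso
    have e1 : (i₂ + 1) * m ≤ i₁ * m :=
      mul_le_mul_of_nonneg_right (by omega) (by omega)
    have e2 : (i₂ + 1) * m = i₂ * m + m := by ring
    linarith

-- ---------- the position dict ----------

theorem pv_posD_keys (l : List String) : (posD l).keys = l := by
  simp only [posD, PySem.Dict.keys, List.map_map]
  simpa [Function.comp_def] using PySem.List.map_snd_enumerate l 0

theorem pv_posD_size (l : List String) : (posD l).size = l.length := by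
  simp [posD, PySem.Dict.size, PySem.List.length_enumerate]

theorem pv_posD_contains (l : List String) (x : String) : (posD l).contains x = l.contains x := by
  rw [PySem.Dict.contains_eq_decide_mem_keys, pv_posD_keys]
  simp [List.contains_iff_mem]

theorem pv_posD_getD_aux : ∀ (l : List String) (s : Int) (x : String), x ∈ l →
    (PySem.Dict.mk ((PySem.List.enumerate l s).map (fun p => (p.2, p.1)))).getD x 0
      = s + (l.idxOf x : Nat) := by
  intro l
  induction l with
  | nil => intro s x hx; simp at hx
  | cons a t ih =>
    intro s x hx
    rw [PySem.List.enumerate_cons, List.map_cons]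
    by_cases hax : a = x
    · subst hax
      rw [PySem.Dict.getD_eq_get?_getD, PySem.Dict.get?_mk_cons, if_pos (by simp)]
      simp [List.idxOf_cons]
    · have hbe : (a == x) = false := by simp [hax]
      rw [PySem.Dict.getD_eq_get?_getD, PySem.Dict.get?_mk_cons, if_neg (by simp [hax]),
          ← PySem.Dict.getD_eq_get?_getD]
      have hxt : x ∈ t := by
        rcases List.mem_cons.mp hx with h | h
        · exact absurd h.symm hax
        · exact h
      rw [ih (s + 1) x hxt]
      simp only [List.idxOf_cons, hbe, cond_false]
      push_cast
      ring

theorem pv_posD_getD (l : List String) (x : String) (hx : x ∈ l) :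
    (posD l).getD x 0 = (l.idxOf x : Nat) := by
  simpa using pv_posD_getD_aux l 0 x hx

theorem pv_enumerate_snoc {α : Type} (x : α) : ∀ (l : List α) (s : Int),
    PySem.List.enumerate (l ++ [x]) s = PySem.List.enumerate l s ++ [(s + l.length, x)] := by
  intro l
  induction l with
  | nil => intro s; simp [PySem.List.enumerate_cons, PySem.List.enumerate_nil]
  | cons a t ih =>
    intro s
    rw [List.cons_append, PySem.List.enumerate_cons, ih (s + 1), PySem.List.enumerate_cons]
    simp only [List.cons_append, List.length_cons]
    push_cast
    rw [show s + 1 + (t.length : Int) = s + ((t.length : Int) + 1) from by ring]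

theorem pv_posD_snoc (l : List String) (x : String) (hx : x ∉ l) :
    (posD l).insert x ((posD l).size : Int) = posD (l ++ [x]) := by
  have hc : (posD l).contains x = false := by
    rw [pv_posD_contains]
    simp [hx]
  apply PySem.Dict.ext
  rw [PySem.Dict.items_insert_of_not_contains _ _ hc]
  show (PySem.List.enumerate l 0).map (fun p => (p.2, p.1)) ++ [(x, ((posD l).size : Int))]
      = (PySem.List.enumerate (l ++ [x]) 0).map (fun p => (p.2, p.1))
  rw [pv_enumerate_snoc, List.map_append, pv_posD_size]
  simp

-- ---------- B's scan pass ----------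

theorem pv_KNOWN_eq (x : String) : PySem.Set.contains pvKNOWN x = pvKnownB x := by
  refine Bool.eq_iff_iff.mpr ?_
  rw [PySem.Set.contains_iff, pvKNOWN, PySem.Set.mem_ofList]
  simp only [pvRISKY, pvKnownB, pvNSAIDS, pvANTICOAGULANTS, pvRENAL]
  simp [List.flatMap_cons, List.contains_iff_mem]
  tauto

theorem pv_bscan (ds : List String) : ∀ (s : PySem.Set String),
    ds.foldl bScan (s, posD (s.filter pvKnownB))
      = (PySem.Set.update s ((ds.filter (fun d => d != "" && PySem.Str.strip d != "")).map normS),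
         posD ((PySem.Set.update s ((ds.filter (fun d => d != "" && PySem.Str.strip d != "")).map normS)).filter pvKnownB)) := by
  induction ds with
  | nil => intro s; simp [PySem.Set.update]
  | cons d t ih =>
    intro s
    by_cases hc : (d != "" && PySem.Str.strip d != "") = true
    · rw [List.foldl_cons]
      have hstep : bScan (s, posD (s.filter pvKnownB)) d =
          (PySem.Set.add s (normS d), posD ((PySem.Set.add s (normS d)).filter pvKnownB)) := by
        have hn : PySem.Str.lower (PySem.Str.strip d) = normS d := rfl
        simp only [bScan, if_pos hc, hn]
        cases hm : PySem.Set.contains s (normS d) with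
        | true =>
          simp only [hm, if_true]
          rw [show PySem.Set.add s (normS d) = s from by rw [PySem.Set.add, if_pos hm]]
        | false =>
          simp only [hm, Bool.false_eq_true, if_false]
          rw [show PySem.Set.add s (normS d) = s ++ [normS d] from by
            rw [PySem.Set.add, if_neg (by intro h; rw [hm] at h; exact Bool.false_ne_true h)]]
          rw [List.filter_append, pv_KNOWN_eq]
          have hns : normS d ∉ s := by
            intro hmem
            have hct := (PySem.Set.contains_iff s (normS d)).mpr hmem
            rw [hm] at hct
            exact Bool.false_ne_true hct
          cases hk : pvKnownB (normS d) with
          | true =>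
            simp only [hk, if_true, List.filter_cons, List.filter_nil]
            rw [pv_posD_snoc _ _ (fun hmem => hns (List.mem_of_mem_filter hmem))]
          | false =>
            simp only [hk, Bool.false_eq_true, if_false, List.filter_cons, List.filter_nil]
            simp
      rw [hstep]
      have := ih (PySem.Set.add s (normS d))
      rw [this]
      have hupd : PySem.Set.update s (((d :: t).filter (fun d => d != "" && PySem.Str.strip d != "")).map normS)
          = PySem.Set.update (PySem.Set.add s (normS d)) ((t.filter (fun d => d != "" && PySem.Str.strip d != "")).map normS) := by
        rw [List.filter_cons, if_pos hc, List.map_cons]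
        rfl
      rw [hupd]
    · rw [List.foldl_cons]
      rw [show bScan (s, posD (s.filter pvKnownB)) d = (s, posD (s.filter pvKnownB)) from by
        rw [bScan, if_neg (by simpa using hc)]]
      rw [ih s, List.filter_cons, if_neg (by simpa using hc)]

-- ---------- sorted present = emission list ----------

theorem pv_item_avoid (m i j : Int) (x y : String) (h : bCondAvoid x y = true) :
    pvItem m i j x y = some (i * m + j, bLab x y, "AVOID") := by
  rw [pvItem, if_pos h]

theorem pv_item_caution (m i j : Int) (x y : String) (hA : bCondAvoid x y = false)
    (hC : bCondCaution x y = true) :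
    pvItem m i j x y = some (i * m + j, bLab x y, "CAUTION") := by
  rw [pvItem, if_neg (by simp [hA]), if_pos hC]

theorem pv_entry_verdict (t : String × String × String) (ht : t ∈ pvRISKY) :
    (t.2.2 = "AVOID" ∧ bCondAvoid t.1 t.2.1 = true)
    ∨ (t.2.2 = "CAUTION" ∧ bCondAvoid t.1 t.2.1 = false ∧ bCondCaution t.1 t.2.1 = true) := by
  have h := (pv_entry_facts t ht).2.2.2.2
  by_cases hv : t.2.2 = "AVOID"
  · rw [if_pos hv] at h
    exact Or.inl ⟨hv, h⟩
  · rw [if_neg hv] at h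
    exact Or.inr ⟨h.2.2, h.1, h.2.1⟩

theorem pv_idx_eq (l : List String) (x y : String) (hx : x ∈ l) (hy : y ∈ l)
    (h : List.idxOf x l = List.idxOf y l) : x = y := by
  have h1 := List.getElem_idxOf (x := x) (xs := l) (List.idxOf_lt_length_of_mem hx)
  have h2 := List.getElem_idxOf (x := y) (xs := l) (List.idxOf_lt_length_of_mem hy)
  rw [← h1, ← h2]
  congr 1

theorem pv_swap_minmax (i j : Int) : (if j < i then (j, i) else (i, j)) = (min i j, max i j) := by
  split_ifs with h
  · rw [min_eq_right h.le, max_eq_left h.le]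
  · rw [min_eq_left (le_of_not_gt h), max_eq_right (le_of_not_gt h)]

theorem pv_E_sub_P_aux (rel : List String) (hK : ∀ x ∈ rel, pvKnownB x = true)
    (z : Int × String × String) (a b : Nat) (x y : String) (hab : a < b)
    (hxm : x ∈ rel) (hym : y ∈ rel)
    (hix : List.idxOf x rel = a) (hiy : List.idxOf y rel = b)
    (hitem : pvItem (rel.length : Int) (a : Int) (b : Int) x y = some z) :
    z ∈ (pvRISKY.filter (fun t => rel.contains t.1 && rel.contains t.2.1)).map (pvG rel) := by
  have hxy : x ≠ y := by
    intro he
    rw [he, hiy] at hix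
    omega
  have hx8 := pv_mem_K8 x (hK x hxm)
  have hy8 := pv_mem_K8 y (hK y hym)
  have hcond : (bCondAvoid x y || bCondCaution x y) = true := by
    rw [pvItem] at hitem
    by_cases hA : bCondAvoid x y = true
    · simp [hA]
    · by_cases hC : bCondCaution x y = true
      · simp [hC]
      · rw [if_neg hA, if_neg hC] at hitem
        exact absurd hitem (by simp)
  obtain ⟨t, htR, hor⟩ := pv_pair_exists x hx8 y hy8 hcond
  obtain ⟨ht8a, ht8b, htne, htlab, -⟩ := pv_entry_facts t htR
  have hvd := pv_entry_verdict t htR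
  refine List.mem_map.mpr ⟨t, List.mem_filter.mpr ⟨htR, ?_⟩, ?_⟩
  · rcases hor with ⟨h1, h2⟩ | ⟨h1, h2⟩ <;>
      simp [h1, h2, List.contains_iff_mem, hxm, hym]
  · -- pvG rel t = z
    have hmina : min ((a : Nat) : Int) ((b : Nat) : Int) = (a : Int) :=
      min_eq_left (by exact_mod_cast hab.le)
    have hmaxb : max ((a : Nat) : Int) ((b : Nat) : Int) = (b : Int) :=
      max_eq_right (by exact_mod_cast hab.le)
    rcases hor with ⟨h1, h2⟩ | ⟨h1, h2⟩
    · -- t = (x, y, v)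
      have hl1 : bLab x y = x ++ " + " ++ y := h1 ▸ h2 ▸ htlab
      have hcA : bCondAvoid t.1 t.2.1 = bCondAvoid x y := by rw [h1, h2]
      by_cases hA : bCondAvoid x y = true
      · have hv : t.2.2 = "AVOID" := by
          rcases hvd with ⟨hv, -⟩ | ⟨-, hf, -⟩
          · exact hv
          · rw [hcA, hA] at hf; exact absurd hf (by simp)
        rw [pv_item_avoid _ _ _ _ _ hA] at hitem
        have hz2 := Option.some.inj hitem
        rw [pvG, h1, h2, hix, hiy, ← hz2]
        simp only [Prod.mk.injEq]
        exact ⟨by rw [hmina, hmaxb], by rw [← hl1], hv⟩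
      · have hA' : bCondAvoid x y = false := by simpa using hA
        have hC : bCondCaution x y = true := by
          rcases Bool.or_eq_true_iff.mp hcond with h | h
          · exact absurd h (by simp [hA'])
          · exact h
        have hv : t.2.2 = "CAUTION" := by
          rcases hvd with ⟨-, hf⟩ | ⟨hv, -⟩
          · rw [hcA, hA'] at hf; exact absurd hf (by simp)
          · exact hv
        rw [pv_item_caution _ _ _ _ _ hA' hC] at hitem
        have hz2 := Option.some.inj hitem
        rw [pvG, h1, h2, hix, hiy, ← hz2]
        simp only [Prod.mk.injEq]
        exact ⟨by rw [hmina, hmaxb], by rw [← hl1], hv⟩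
    · -- t = (y, x, v)
      have hyx : y ≠ x := fun h => hxy h.symm
      have hl2 : bLab y x = y ++ " + " ++ x := h1 ▸ h2 ▸ htlab
      have hcA : bCondAvoid t.1 t.2.1 = bCondAvoid x y := by
        rw [h1, h2, pv_condA_symm]
      by_cases hA : bCondAvoid x y = true
      · have hv : t.2.2 = "AVOID" := by
          rcases hvd with ⟨hv, -⟩ | ⟨-, hf, -⟩
          · exact hv
          · rw [hcA, hA] at hf; exact absurd hf (by simp)
        rw [pv_item_avoid _ _ _ _ _ hA] at hitem
        have hz2 := Option.some.inj hitem
        rw [pvG, h1, h2, hix, hiy, ← hz2]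
        simp only [Prod.mk.injEq]
        refine ⟨by rw [min_comm, hmina, max_comm, hmaxb], ?_, hv⟩
        rw [← hl2, pv_lab_symm y hy8 x hx8 hyx]
      · have hA' : bCondAvoid x y = false := by simpa using hA
        have hC : bCondCaution x y = true := by
          rcases Bool.or_eq_true_iff.mp hcond with h | h
          · exact absurd h (by simp [hA'])
          · exact h
        have hv : t.2.2 = "CAUTION" := by
          rcases hvd with ⟨-, hf⟩ | ⟨hv, -⟩
          · rw [hcA, hA'] at hf; exact absurd hf (by simp)
          · exact hv
        rw [pv_item_caution _ _ _ _ _ hA' hC] at hitem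
        have hz2 := Option.some.inj hitem
        rw [pvG, h1, h2, hix, hiy, ← hz2]
        simp only [Prod.mk.injEq]
        refine ⟨by rw [min_comm, hmina, max_comm, hmaxb], ?_, hv⟩
        rw [← hl2, pv_lab_symm y hy8 x hx8 hyx]

theorem pv_E_sub_P (rel : List String) (hnd : rel.Nodup) (hK : ∀ x ∈ rel, pvKnownB x = true)
    (z : Int × String × String) (hz : z ∈ pvEmit (rel.length : Int) 0 rel) :
    z ∈ (pvRISKY.filter (fun t => rel.contains t.1 && rel.contains t.2.1)).map (pvG rel) := by
  obtain ⟨a, b, hab, hb, hitem⟩ := (pv_emit_mem (rel.length : Int) rel 0 z).mp hz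
  simp only [zero_add] at hitem
  have ha : a < rel.length := lt_trans hab hb
  rw [List.getD_eq_getElem rel "" ha, List.getD_eq_getElem rel "" hb] at hitem
  exact pv_E_sub_P_aux rel hK z a b _ _ hab (List.getElem_mem ha) (List.getElem_mem hb)
    (hnd.idxOf_getElem a ha) (hnd.idxOf_getElem b hb) hitem

theorem pv_P_sub_E (rel : List String)
    (z : Int × String × String)
    (hz : z ∈ (pvRISKY.filter (fun t => rel.contains t.1 && rel.contains t.2.1)).map (pvG rel)) :
    z ∈ pvEmit (rel.length : Int) 0 rel := by
  obtain ⟨t, htf, hgz⟩ := List.mem_map.mp hz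
  obtain ⟨htR, hcc⟩ := List.mem_filter.mp htf
  have h1m : t.1 ∈ rel := by
    have := (Bool.and_eq_true _ _).mp hcc |>.1
    simpa [List.contains_iff_mem] using this
  have h2m : t.2.1 ∈ rel := by
    have := (Bool.and_eq_true _ _).mp hcc |>.2
    simpa [List.contains_iff_mem] using this
  obtain ⟨ht8a, ht8b, htne, htlab, -⟩ := pv_entry_facts t htR
  have hvd := pv_entry_verdict t htR
  set i0 := List.idxOf t.1 rel with hi0
  set j0 := List.idxOf t.2.1 rel with hj0
  have hi0l : i0 < rel.length := List.idxOf_lt_length_of_mem h1m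
  have hj0l : j0 < rel.length := List.idxOf_lt_length_of_mem h2m
  have hij : i0 ≠ j0 := fun h => htne (pv_idx_eq rel t.1 t.2.1 h1m h2m h)
  have hgd1 : rel.getD i0 "" = t.1 := by
    rw [List.getD_eq_getElem rel "" hi0l]
    exact List.getElem_idxOf hi0l
  have hgd2 : rel.getD j0 "" = t.2.1 := by
    rw [List.getD_eq_getElem rel "" hj0l]
    exact List.getElem_idxOf hj0l
  rcases Nat.lt_or_ge i0 j0 with hlt | hge
  · refine (pv_emit_mem (rel.length : Int) rel 0 z).mpr ⟨i0, j0, hlt, hj0l, ?_⟩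
    simp only [zero_add]
    rw [hgd1, hgd2]
    have hmin : min ((i0 : Nat) : Int) ((j0 : Nat) : Int) = (i0 : Int) :=
      min_eq_left (by exact_mod_cast hlt.le)
    have hmax : max ((i0 : Nat) : Int) ((j0 : Nat) : Int) = (j0 : Int) :=
      max_eq_right (by exact_mod_cast hlt.le)
    rcases hvd with ⟨hv, hA⟩ | ⟨hv, hA, hC⟩
    · rw [pv_item_avoid _ _ _ _ _ hA, ← hgz, pvG, ← hi0, ← hj0, hmin, hmax, htlab, hv]
    · rw [pv_item_caution _ _ _ _ _ hA hC, ← hgz, pvG, ← hi0, ← hj0, hmin, hmax, htlab, hv]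
  · have hlt : j0 < i0 := by omega
    refine (pv_emit_mem (rel.length : Int) rel 0 z).mpr ⟨j0, i0, hlt, hi0l, ?_⟩
    simp only [zero_add]
    rw [hgd1, hgd2]
    have hmin : min ((i0 : Nat) : Int) ((j0 : Nat) : Int) = (j0 : Int) :=
      min_eq_right (by exact_mod_cast hlt.le)
    have hmax : max ((i0 : Nat) : Int) ((j0 : Nat) : Int) = (i0 : Int) :=
      max_eq_left (by exact_mod_cast hlt.le)
    have hsA : bCondAvoid t.2.1 t.1 = bCondAvoid t.1 t.2.1 := pv_condA_symm _ _
    have hsC : bCondCaution t.2.1 t.1 = bCondCaution t.1 t.2.1 := pv_condC_symm _ _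
    have hslab : bLab t.2.1 t.1 = bLab t.1 t.2.1 :=
      pv_lab_symm t.2.1 ht8b t.1 ht8a (fun h => htne h.symm)
    rcases hvd with ⟨hv, hA⟩ | ⟨hv, hA, hC⟩
    · rw [pv_item_avoid _ _ _ _ _ (by rw [hsA]; exact hA)]
      rw [← hgz, pvG, ← hi0, ← hj0, hmin, hmax, hslab, htlab, hv]
    · rw [pv_item_caution _ _ _ _ _ (by rw [hsA]; exact hA) (by rw [hsC]; exact hC)]
      rw [← hgz, pvG, ← hi0, ← hj0, hmin, hmax, hslab, htlab, hv]

theorem pv_P_nodup (rel : List String) (hnd : rel.Nodup) :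
    ((pvRISKY.filter (fun t => rel.contains t.1 && rel.contains t.2.1)).map (pvG rel)).Nodup := by
  have hfil : (pvRISKY.filter (fun t => rel.contains t.1 && rel.contains t.2.1)).Nodup :=
    List.Nodup.filter _ (by decide)
  refine List.Nodup.map_on ?_ hfil
  intro t ht t' ht' heq
  obtain ⟨htR, hcc⟩ := List.mem_filter.mp ht
  obtain ⟨htR', hcc'⟩ := List.mem_filter.mp ht'
  have h1m : t.1 ∈ rel := by
    have := (Bool.and_eq_true _ _).mp hcc |>.1
    simpa [List.contains_iff_mem] using this
  have h2m : t.2.1 ∈ rel := by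
    have := (Bool.and_eq_true _ _).mp hcc |>.2
    simpa [List.contains_iff_mem] using this
  have h1m' : t'.1 ∈ rel := by
    have := (Bool.and_eq_true _ _).mp hcc' |>.1
    simpa [List.contains_iff_mem] using this
  have h2m' : t'.2.1 ∈ rel := by
    have := (Bool.and_eq_true _ _).mp hcc' |>.2
    simpa [List.contains_iff_mem] using this
  have htne := (pv_entry_facts t htR).2.2.1
  have htne' := (pv_entry_facts t' htR').2.2.1
  set i1 := List.idxOf t.1 rel with hi1
  set j1 := List.idxOf t.2.1 rel with hj1
  set i2 := List.idxOf t'.1 rel with hi2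
  set j2 := List.idxOf t'.2.1 rel with hj2
  have hi1l : i1 < rel.length := List.idxOf_lt_length_of_mem h1m
  have hj1l : j1 < rel.length := List.idxOf_lt_length_of_mem h2m
  have hi2l : i2 < rel.length := List.idxOf_lt_length_of_mem h1m'
  have hj2l : j2 < rel.length := List.idxOf_lt_length_of_mem h2m'
  have hij1 : i1 ≠ j1 := fun h => htne (pv_idx_eq rel t.1 t.2.1 h1m h2m h)
  have hij2 : i2 ≠ j2 := fun h => htne' (pv_idx_eq rel t'.1 t'.2.1 h1m' h2m' h)
  have hrank : min ((i1 : Nat) : Int) ((j1 : Nat) : Int) * (rel.length : Int)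
        + max ((i1 : Nat) : Int) ((j1 : Nat) : Int)
      = min ((i2 : Nat) : Int) ((j2 : Nat) : Int) * (rel.length : Int)
        + max ((i2 : Nat) : Int) ((j2 : Nat) : Int) := by
    have := congrArg Prod.fst heq
    simpa [pvG, ← hi1, ← hj1, ← hi2, ← hj2] using this
  have hinj := pv_rank_inj (rel.length : Int) _ _ _ _
    (by omega) (by omega) (by push_cast; omega)
    (by omega) (by omega) (by push_cast; omega) hrank
  have hpos : (i1 = i2 ∧ j1 = j2) ∨ (i1 = j2 ∧ j1 = i2) := by omega
  rcases hpos with ⟨ha, hb⟩ | ⟨ha, hb⟩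
  · exact pv_entries_distinct t htR t' htR' (Or.inl
      ⟨pv_idx_eq rel t.1 t'.1 h1m h1m' (by rw [← hi1, ← hi2]; exact ha),
       pv_idx_eq rel t.2.1 t'.2.1 h2m h2m' (by rw [← hj1, ← hj2]; exact hb)⟩)
  · exact pv_entries_distinct t htR t' htR' (Or.inr
      ⟨pv_idx_eq rel t.1 t'.2.1 h1m h2m' (by rw [← hi1, ← hj2]; exact ha),
       pv_idx_eq rel t.2.1 t'.1 h2m h1m' (by rw [← hj1, ← hi2]; exact hb)⟩)

theorem pv_sorted_present (rel : List String) (hnd : rel.Nodup) (hK : ∀ x ∈ rel, pvKnownB x = true) :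
    PySem.List.sorted
      ((pvRISKY.filter (fun t => rel.contains t.1 && rel.contains t.2.1)).map (pvG rel))
      (fun t => t.1) false
    = pvEmit (rel.length : Int) 0 rel := by
  have hpw : (pvEmit (rel.length : Int) 0 rel).Pairwise (fun a b => a.1 < b.1) :=
    pv_emit_pairwise (rel.length : Int) rel 0 le_rfl (by simp)
  refine PySem.List.sorted_eq_of_perm_of_pairwise_lt _ _ _ ?_ hpw
  have hEnd : (pvEmit (rel.length : Int) 0 rel).Nodup :=
    hpw.imp (fun h => by intro he; rw [he] at h; exact lt_irrefl _ h)
  refine (List.perm_ext_iff_of_nodup hEnd (pv_P_nodup rel hnd)).mpr ?_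
  intro z
  exact ⟨pv_E_sub_P rel hnd hK z, pv_P_sub_E rel z⟩

-- ---------- assembling the two programs ----------

theorem pv_present_eq (rel : List String) :
    pvRISKY.foldl (fun acc t =>
      if (posD rel).contains t.1 && (posD rel).contains t.2.1 then
        acc ++ [(let i := (posD rel).getD t.1 0
                 let j := (posD rel).getD t.2.1 0
                 let ij := if j < i then (j, i) else (i, j)
                 (ij.1 * ((posD rel).size : Int) + ij.2, t.1 ++ " + " ++ t.2.1, t.2.2))]
      else acc) []
      = (pvRISKY.filter (fun t => rel.contains t.1 && rel.contains t.2.1)).map (pvG rel) := by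
  rw [PySem.List.foldl_append_if
    (fun t => (posD rel).contains t.1 && (posD rel).contains t.2.1)
    (fun t => (let i := (posD rel).getD t.1 0
               let j := (posD rel).getD t.2.1 0
               let ij := if j < i then (j, i) else (i, j)
               (ij.1 * ((posD rel).size : Int) + ij.2, t.1 ++ " + " ++ t.2.1, t.2.2)))
    pvRISKY []]
  rw [List.nil_append]
  have hf : pvRISKY.filter (fun t => (posD rel).contains t.1 && (posD rel).contains t.2.1)
      = pvRISKY.filter (fun t => rel.contains t.1 && rel.contains t.2.1) := by
    simp only [pv_posD_contains]
  rw [hf]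
  apply List.map_congr_left
  intro t htf
  obtain ⟨htR, hcc⟩ := List.mem_filter.mp htf
  have h1m : t.1 ∈ rel := by
    simpa [List.contains_iff_mem] using ((Bool.and_eq_true _ _).mp hcc).1
  have h2m : t.2.1 ∈ rel := by
    simpa [List.contains_iff_mem] using ((Bool.and_eq_true _ _).mp hcc).2
  simp only []
  rw [pv_posD_getD rel t.1 h1m, pv_posD_getD rel t.2.1 h2m, pv_posD_size, pv_swap_minmax]
  rfl

theorem pv_main (drugs : List String) :
    evaluate_pairwise_interactions drugs = evaluate_pairwise_interactions_alt drugs := by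
  simp only [evaluate_pairwise_interactions, evaluate_pairwise_interactions_alt]
  rw [show (PySem.Set.empty, (PySem.Dict.empty : PySem.Dict String Int))
      = (([] : PySem.Set String), posD (List.filter pvKnownB [])) from rfl]
  rw [pv_bscan drugs []]
  rw [PySem.List.dedup_eq_ofList]
  rw [show ((drugs.filter (fun d => d != "" && PySem.Str.strip d != "")).map
        (fun d => PySem.Str.lower (PySem.Str.strip d)))
      = ((drugs.filter (fun d => d != "" && PySem.Str.strip d != "")).map normS) from rfl]
  rw [show PySem.Set.update ([] : PySem.Set String)
        ((drugs.filter (fun d => d != "" && PySem.Str.strip d != "")).map normS)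
      = PySem.Set.ofList ((drugs.filter (fun d => d != "" && PySem.Str.strip d != "")).map normS)
      from PySem.Set.update_nil_left _]
  set u := PySem.Set.ofList ((drugs.filter (fun d => d != "" && PySem.Str.strip d != "")).map normS) with hu
  have hnorm : ∀ z ∈ u, normS z = z := by
    intro z hz
    rw [hu, PySem.Set.mem_ofList] at hz
    obtain ⟨d, _, hd⟩ := List.mem_map.mp hz
    rw [← hd]
    exact pv_norm_norm d
  have hndu : u.Nodup := by rw [hu]; exact PySem.Set.nodup_ofList _
  by_cases hlen : u.length < 2
  · simp only [hlen, if_true]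
    rfl
  · simp only [hlen, if_false]
    set rel := List.filter pvKnownB u with hrel
    have hndrel : rel.Nodup := by rw [hrel]; exact hndu.filter _
    have hKrel : ∀ x ∈ rel, pvKnownB x = true := by
      rw [hrel]
      exact fun x hx => (List.mem_filter.mp hx).2
    have hA := pv_enumSliceFold aInner u u 0 rfl
      (PySem.Dict.ofList [("avoid_pairs", []), ("caution_pairs", [])], false)
    rw [show ((0 : Nat) : Int) = (0 : Int) from rfl] at hA
    rw [hA]
    rw [show (PySem.Dict.ofList [("avoid_pairs", []), ("caution_pairs", [])], false)
        = (mkD [] [], !([] : List String).isEmpty) from rfl]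
    rw [pv_pairFoldEq u hnorm [] []]
    rw [← hrel]
    rw [pv_present_eq rel]
    rw [pv_sorted_present rel hndrel hKrel]
    rw [pv_emit_parts (rel.length : Int) rel 0 [] []]
    simp only [List.nil_append]
    rw [show ((pvEmit (rel.length : Int) 0 rel).filter (fun t => t.2.2 == "AVOID")).map (fun t => t.2.1)
        = pvA (pvEmit (rel.length : Int) 0 rel) from rfl,
        show ((pvEmit (rel.length : Int) 0 rel).filter (fun t => t.2.2 != "AVOID")).map (fun t => t.2.1)
        = pvC (pvEmit (rel.length : Int) 0 rel) from rfl]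
    rw [pv_getD_avoid]
    simp only [pv_bne_nil]
    by_cases h1 : (!(pvA (pvEmit (rel.length : Int) 0 rel)).isEmpty) = true
    · simp only [h1, if_true]
      rfl
    · simp only [h1, Bool.false_eq_true, if_false]
      by_cases h2 : (!(pvC (pvEmit (rel.length : Int) 0 rel)).isEmpty) = true
      · simp only [h2, if_true]
        rfl
      · simp only [h2, Bool.false_eq_true, if_false]
        rfl

theorem pv_spec_final : ∀ (drugs : List String), Dom_evaluate_pairwise_interactions drugs →
    Spec_evaluate_pairwise_interactions drugs (evaluate_pairwise_interactions drugs) := by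
  intro drugs _
  unfold Spec_evaluate_pairwise_interactions
  exact pv_main drugs

-- ===== VERDICT (by name: the statement is the Claim_ definition above) =====
theorem evaluate_pairwise_interactions_spec : Claim_equal_evaluate_pairwise_interactions := by
  unfold Claim_equal_evaluate_pairwise_interactions
  exact pv_spec_final
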